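-- pv_equiv track=rewrite | github.com/Cbravor1991/PythonGuiaDeEjercicios | cadenas_de_caracteres/ejercicio_6.py | reemplazo_vocales
-- ===== SOURCE A (Python) =====
-- def reemplazo_vocales(cadena_caracteres):
--     letra_vocales = ["a", "e", "i", "o", "u"]
--     respuesta = ""
--     for letra in cadena_caracteres:
--         if letra not in letra_vocales:
--             respuesta+=letra
--         else:
--             if letra == "u":
--                 respuesta+= "a"
--             else:
--                 posicion_letra_encontrada = letra_vocales.index(letra)
--                 respuesta+= letra_vocales[posicion_letra_encontrada+1]
--
--     return respuesta
-- ===== SOURCE B (Python) =====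
-- def reemplazo_vocales(cadena_caracteres):
--     # staged whole-string substitution passes, in reverse vowel order;
--     # 'u' is parked on a sentinel first so the cycle u->a does not collide
--     s = cadena_caracteres.replace('u', '\x00')
--     s = s.replace('o', 'u')
--     s = s.replace('i', 'o')
--     s = s.replace('e', 'i')
--     s = s.replace('a', 'e')
--     return s.replace('\x00', 'a')
-- ===== Notes on version B (the rewrite author's own statement) =====
-- stated objective: alternative
-- what changed: Replaces A's single per-character loop with branching and list.index by six staged whole-string str.replace passes applied in reverse vowel order, with a sentinel character parking the wrap-around vowel so the cyclic substitution does not collide with the previous pass.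
import Mathlib
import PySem

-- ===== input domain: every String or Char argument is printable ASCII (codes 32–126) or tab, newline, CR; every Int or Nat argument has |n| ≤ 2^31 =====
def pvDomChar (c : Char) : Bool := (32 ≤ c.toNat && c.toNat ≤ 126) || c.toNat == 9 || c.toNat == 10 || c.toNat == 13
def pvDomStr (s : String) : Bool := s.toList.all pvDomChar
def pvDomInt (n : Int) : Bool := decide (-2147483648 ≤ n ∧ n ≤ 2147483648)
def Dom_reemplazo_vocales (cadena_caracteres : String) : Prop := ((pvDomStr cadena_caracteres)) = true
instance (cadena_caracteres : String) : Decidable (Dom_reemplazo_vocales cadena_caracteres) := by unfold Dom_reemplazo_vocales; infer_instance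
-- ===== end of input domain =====

-- B replaces A's per-character loop with branching and list.index by six staged
-- whole-string str.replace passes in reverse vowel order (a sentinel parks 'u'
-- so the cyclic u->a does not collide with o->u); alternative decomposition.

-- ===== PORT A =====
-- literal transliteration: the for-loop becomes a foldl over the characters,
-- branches in the same order; vowels[pos+1] ported with List.getD (in A that
-- index is always in range since the 'u' branch was taken before).
def reemplazo_vocales (cadena_caracteres : String) : String :=
  let letra_vocales : List Char := ['a', 'e', 'i', 'o', 'u']
  cadena_caracteres.toList.foldl
    (fun respuesta letra =>
      if letra ∉ letra_vocales then
        respuesta.push letra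
      else
        if letra = 'u' then
          respuesta.push 'a'
        else
          let posicion_letra_encontrada := (PySem.List.index? letra_vocales letra).getD 0
          respuesta.push (letra_vocales.getD (posicion_letra_encontrada + 1) letra))
    ""

-- ===== PORT B =====
-- six staged str.replace passes, exactly Source B's sequence ('\x00' is the sentinel)
def reemplazo_vocales_alt (cadena_caracteres : String) : String :=
  let s := PySem.Str.replace cadena_caracteres "u" "\x00"
  let s := PySem.Str.replace s "o" "u"
  let s := PySem.Str.replace s "i" "o"
  let s := PySem.Str.replace s "e" "i"
  let s := PySem.Str.replace s "a" "e"
  PySem.Str.replace s "\x00" "a"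

-- ===== PRECONDITION & SPEC =====
def Spec_reemplazo_vocales (cadena_caracteres : String) (out : String) : Prop := out = reemplazo_vocales_alt cadena_caracteres
instance (cadena_caracteres : String) (out : String) : Decidable (Spec_reemplazo_vocales cadena_caracteres out) := by unfold Spec_reemplazo_vocales; infer_instance

-- ===== CLAIM (what is proved, stated in full; the proofs are below) =====
def Claim_equal_reemplazo_vocales : Prop := ∀ (cadena_caracteres : String), Dom_reemplazo_vocales cadena_caracteres → Spec_reemplazo_vocales cadena_caracteres (reemplazo_vocales cadena_caracteres)

-- ===== LEMMAS AND PROOFS =====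

-- single-character replace is a pointwise map (by induction on the fuel of replace.go)
theorem pv_go_single (o n : Char) :
    ∀ (fuel : Nat) (l acc : List Char), l.length ≤ fuel →
      PySem.Chars.replace.go [o] [n] fuel l acc
        = acc.reverse ++ l.map (fun c => if c = o then n else c) := by
  intro fuel
  induction fuel with
  | zero =>
    intro l acc h
    have : l = [] := List.eq_nil_of_length_eq_zero (Nat.le_zero.mp h)
    subst this
    simp [PySem.Chars.replace.go]
  | succ k ih =>
    intro l acc h
    cases l with
    | nil => simp [PySem.Chars.replace.go]
    | cons c t =>
      by_cases hc : c = o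
      · subst hc
        have hp : [c].isPrefixOf (c :: t) = true := by simp [List.isPrefixOf]
        simp only [PySem.Chars.replace.go, hp, if_pos]
        rw [show List.drop [c].length (c :: t) = t from rfl,
            show [n].reverse ++ acc = n :: acc from rfl,
            ih t (n :: acc) (by simpa using h)]
        simp
      · have hp : [o].isPrefixOf (c :: t) = false := by
          simp [List.isPrefixOf]
          intro h'; exact absurd h'.symm hc
        simp only [PySem.Chars.replace.go, hp]
        rw [ih t (c :: acc) (by simpa using h)]
        simp [hc]

theorem pv_replace_single (o n : Char) (l : List Char) :
    PySem.Chars.replace l [o] [n] = l.map (fun c => if c = o then n else c) := by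
  rw [PySem.Chars.replace]
  simp only [List.isEmpty_cons, if_false, Bool.false_eq_true]
  exact pv_go_single o n l.length l [] (le_refl _)

-- A's per-character branch chain as one function
def pvStepA (c : Char) : Char :=
  if c ∉ (['a', 'e', 'i', 'o', 'u'] : List Char) then c
  else if c = 'u' then 'a'
  else (['a', 'e', 'i', 'o', 'u'] : List Char).getD
        (((PySem.List.index? ['a', 'e', 'i', 'o', 'u'] c).getD 0) + 1) c

-- A's fold with push, against String.ofList of a map
theorem pv_fold_eq (l : List Char) (acc : String) :
    l.foldl
      (fun respuesta letra =>
        if letra ∉ (['a', 'e', 'i', 'o', 'u'] : List Char) then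
          respuesta.push letra
        else
          if letra = 'u' then
            respuesta.push 'a'
          else
            respuesta.push ((['a', 'e', 'i', 'o', 'u'] : List Char).getD
              (((PySem.List.index? ['a', 'e', 'i', 'o', 'u'] letra).getD 0) + 1) letra))
      acc
    = acc ++ String.ofList (l.map pvStepA) := by
  induction l generalizing acc with
  | nil =>
    apply String.toList_inj.mp
    simp
  | cons x xs ih =>
    rw [List.foldl_cons, ih]
    have hx : (if x ∉ (['a', 'e', 'i', 'o', 'u'] : List Char) then acc.push x
        else if x = 'u' then acc.push 'a'
        else acc.push ((['a', 'e', 'i', 'o', 'u'] : List Char).getD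
          (((PySem.List.index? ['a', 'e', 'i', 'o', 'u'] x).getD 0) + 1) x))
        = acc.push (pvStepA x) := by
      unfold pvStepA
      split_ifs <;> rfl
    rw [hx]
    apply String.toList_inj.mp
    simp

-- the six staged single-char maps compose, on a Dom character, to A's step
theorem pv_comp_eq (c : Char) (hc : pvDomChar c = true) :
    (fun c => if c = '\x00' then 'a' else c)
      ((fun c => if c = 'a' then 'e' else c)
        ((fun c => if c = 'e' then 'i' else c)
          ((fun c => if c = 'i' then 'o' else c)
            ((fun c => if c = 'o' then 'u' else c)
              ((fun c => if c = 'u' then '\x00' else c) c)))))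
    = pvStepA c := by
  have h0 : c ≠ '\x00' := by
    intro h; subst h; simp [pvDomChar] at hc
  by_cases ha : c = 'a'
  · subst ha; decide
  · by_cases he : c = 'e'
    · subst he; decide
    · by_cases hi : c = 'i'
      · subst hi; decide
      · by_cases ho : c = 'o'
        · subst ho; decide
        · by_cases hu : c = 'u'
          · subst hu; decide
          · have hmem : c ∉ (['a', 'e', 'i', 'o', 'u'] : List Char) := by
              simp [ha, he, hi, ho, hu]
            simp [pvStepA, hmem, ha, he, hi, ho, hu, h0]

-- ===== VERDICT (by name: the statement is the Claim_ definition above) =====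
theorem reemplazo_vocales_spec : Claim_equal_reemplazo_vocales := by
  intro s hdom
  show reemplazo_vocales s = reemplazo_vocales_alt s
  simp only [reemplazo_vocales, reemplazo_vocales_alt]
  rw [pv_fold_eq]
  apply String.toList_inj.mp
  simp only [String.toList_append, String.toList_ofList, String.toList_empty,
    List.nil_append, PySem.Str.toList_replace]
  rw [show ("u" : String).toList = ['u'] from rfl,
      show ("\x00" : String).toList = ['\x00'] from rfl,
      show ("o" : String).toList = ['o'] from rfl,
      show ("i" : String).toList = ['i'] from rfl,
      show ("e" : String).toList = ['e'] from rfl,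
      show ("a" : String).toList = ['a'] from rfl]
  rw [pv_replace_single, pv_replace_single, pv_replace_single,
      pv_replace_single, pv_replace_single, pv_replace_single]
  simp only [List.map_map]
  apply List.map_congr_left
  intro c hcmem
  have hc : pvDomChar c = true := by
    have := hdom
    unfold Dom_reemplazo_vocales pvDomStr at this
    exact List.all_eq_true.mp this c hcmem
  simpa [Function.comp] using (pv_comp_eq c hc).symm
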